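-- pv_equiv track=rewrite | github.com/elokus/TaskChain | task_chain/parser/string_formatter/task_formatter.py | trim_lines
-- ===== SOURCE A (Python) =====
-- def trim_lines(content: str, indent=14, max_width=61):
--     lines = []
--     for line in content.split("\n"):
--         while len(line)+indent > max_width:
--             if not lines:
--                 lines.append(line[:max_width-indent-1] + "-")
--                 line = line[max_width-indent-1:]
--             else:
--                 lines.append(" "*indent + line[:max_width-indent-1] + "-")
--                 line = line[max_width-indent-1:]
--         if not lines:
--             lines.append(line)
--         else:
--             lines.append(" "*indent + line)
--     return lines
-- ===== SOURCE B (Python) =====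
-- def trim_lines(content: str, indent=14, max_width=61):
--     # Pass 1: flatten every input line into raw segments (chunk count k in closed form).
--     w = max_width - indent - 1
--     segments = []
--     for line in content.split("\n"):
--         k = (len(line) - w - 2) // w + 1 if len(line) + indent > max_width else 0
--         segments.extend(line[i * w:(i + 1) * w] + "-" for i in range(k))
--         segments.append(line[k * w:])
--     # Pass 2: positional indentation — only the very first segment stays flush left.
--     return [seg if i == 0 else " " * indent + seg for i, seg in enumerate(segments)]
-- ===== Notes on version B (the rewrite author's own statement) =====
-- stated objective: alternative
-- what changed: B computes each line's continuation-chunk count in closed form ((len-w-2)//w+1) and slices the chunks by index instead of re-peeling a shrinking string in a while loop, and moves the only-the-very-first-segment-unindented rule out of the generating loop into a second positional enumerate pass over the flat segment list.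
import Mathlib
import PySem

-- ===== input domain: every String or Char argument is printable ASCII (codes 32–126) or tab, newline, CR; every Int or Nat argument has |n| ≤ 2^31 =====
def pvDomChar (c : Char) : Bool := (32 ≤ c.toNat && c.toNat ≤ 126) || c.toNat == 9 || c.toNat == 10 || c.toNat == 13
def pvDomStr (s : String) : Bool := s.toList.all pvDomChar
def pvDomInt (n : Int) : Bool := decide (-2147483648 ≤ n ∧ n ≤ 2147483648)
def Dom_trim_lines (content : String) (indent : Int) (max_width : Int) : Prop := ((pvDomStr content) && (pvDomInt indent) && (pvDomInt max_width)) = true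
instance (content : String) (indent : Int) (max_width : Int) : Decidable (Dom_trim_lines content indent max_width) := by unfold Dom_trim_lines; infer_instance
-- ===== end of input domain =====

-- B re-derives each wrapped line's chunk count in closed form and applies the indentation in a
-- separate positional pass over the flat segment list (alternative decomposition, same cost).


-- ===== PORT A =====
-- inner 'while len(line)+indent > max_width' loop; fuel = len(line)+1 suffices whenever the
-- Python loop terminates (each iteration removes max_width-indent-1 ≥ 1 characters)
def trimLoopA (indent max_width : Int) : Nat → List Char → List (List Char) → List (List Char) × List Char
  | 0, line, lines => (lines, line)
  | fuel+1, line, lines =>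
    if (line.length : Int) + indent > max_width then
      if lines = [] then
        trimLoopA indent max_width fuel
          (PySem.List.slice line (some (max_width - indent - 1)) none)
          (lines ++ [PySem.List.slice line none (some (max_width - indent - 1)) ++ ['-']])
      else
        trimLoopA indent max_width fuel
          (PySem.List.slice line (some (max_width - indent - 1)) none)
          (lines ++ [PySem.List.pyRepeat [' '] indent ++
                     (PySem.List.slice line none (some (max_width - indent - 1)) ++ ['-'])])
    else (lines, line)

def trim_lines (content : String) (indent : Int) (max_width : Int) : List String :=
  (((PySem.Chars.splitOn content.toList ['\n']).foldl
      (fun lines line =>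
        if (trimLoopA indent max_width (line.length + 1) line lines).1 = [] then
          (trimLoopA indent max_width (line.length + 1) line lines).1
            ++ [(trimLoopA indent max_width (line.length + 1) line lines).2]
        else
          (trimLoopA indent max_width (line.length + 1) line lines).1
            ++ [PySem.List.pyRepeat [' '] indent
                ++ (trimLoopA indent max_width (line.length + 1) line lines).2])
      []) ).map String.ofList

-- ===== PORT B =====
-- raw (un-indented) segments of one input line: k chunks of width w ended by '-', then the rest
def segsB (w indent max_width : Int) (line : List Char) : List (List Char) :=
  let k := if (line.length : Int) + indent > max_width
           then PySem.Int.floordiv ((line.length : Int) - w - 2) w + 1 else 0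
  (PySem.List.pyRange 0 k).map
      (fun i => PySem.List.slice line (some (i * w)) (some ((i + 1) * w)) ++ ['-'])
    ++ [PySem.List.slice line (some (k * w)) none]

def trim_lines_alt (content : String) (indent : Int) (max_width : Int) : List String :=
  (PySem.List.enumerate
      ((PySem.Chars.splitOn content.toList ['\n']).flatMap
        (segsB (max_width - indent - 1) indent max_width))).map
    (fun p => if p.1 = 0 then String.ofList p.2
              else String.ofList (PySem.List.pyRepeat [' '] indent ++ p.2))

-- ===== PRECONDITION & SPEC =====
-- Pre_ excludes exactly the inputs on which A's while loop never terminates (chunk width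
-- max_width-indent-1 ≤ 0 while some line satisfies len(line)+indent > max_width): A diverges
-- there (and B raises ZeroDivisionError when the width is 0).
def Pre_trim_lines (content : String) (indent : Int) (max_width : Int) : Prop :=
  indent + 2 ≤ max_width ∨
    ∀ l ∈ PySem.Chars.splitOn content.toList ['\n'], (l.length : Int) + indent ≤ max_width
instance (content : String) (indent : Int) (max_width : Int) : Decidable (Pre_trim_lines content indent max_width) := by unfold Pre_trim_lines; infer_instance

def pvWitness_trim_lines : String × Int × Int := ("hello world, a longer line\nshort", 4, 12)

def Spec_trim_lines (content : String) (indent : Int) (max_width : Int) (out : List String) : Prop := out = trim_lines_alt content indent max_width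
instance (content : String) (indent : Int) (max_width : Int) (out : List String) : Decidable (Spec_trim_lines content indent max_width out) := by unfold Spec_trim_lines; infer_instance

-- ===== CLAIM (what is proved, stated in full; the proofs are below) =====
def Claim_equal_trim_lines : Prop := ∀ (content : String) (indent : Int) (max_width : Int), Dom_trim_lines content indent max_width → Pre_trim_lines content indent max_width → Spec_trim_lines content indent max_width (trim_lines content indent max_width)

-- ===== LEMMAS AND PROOFS =====

-- proof-side helpers
def pvInd (indent : Int) (s : List Char) : List Char := PySem.List.pyRepeat [' '] indent ++ s

-- decorate a segment list: if b (nothing emitted yet) the first segment stays plain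
def pvDec (indent : Int) (b : Bool) (segs : List (List Char)) : List (List Char) :=
  match b, segs with
  | true, s :: rest => s :: rest.map (pvInd indent)
  | _, segs => segs.map (pvInd indent)

-- A's per-line segments (chunks ++ final rest), same fuel discipline as trimLoopA
def chunksW (indent max_width : Int) : Nat → List Char → List (List Char)
  | 0, line => [line]
  | fuel+1, line =>
    if (line.length : Int) + indent > max_width then
      (PySem.List.slice line none (some (max_width - indent - 1)) ++ ['-']) ::
        chunksW indent max_width fuel
          (PySem.List.slice line (some (max_width - indent - 1)) none)
    else [line]

theorem chunksW_ne_nil (indent max_width : Int) (fuel : Nat) (line : List Char) :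
    chunksW indent max_width fuel line ≠ [] := by
  cases fuel with
  | zero => simp [chunksW]
  | succ f => unfold chunksW; split <;> simp

theorem pvDec_append (indent : Int) (b : Bool) (s t : List (List Char)) (hs : s ≠ []) :
    pvDec indent b (s ++ t) = pvDec indent b s ++ t.map (pvInd indent) := by
  cases b with
  | false => simp [pvDec]
  | true =>
    cases s with
    | nil => exact absurd rfl hs
    | cons x s' => simp [pvDec]

theorem pvDec_ne_nil (indent : Int) (b : Bool) (s : List (List Char)) (hs : s ≠ []) :
    pvDec indent b s ≠ [] := by
  cases b <;> cases s <;> simp_all [pvDec]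

-- A's inner loop followed by the final append, restructured via pvDec
theorem trimLoopA_eq (indent max_width : Int) (fuel : Nat) (line : List Char)
    (lines : List (List Char)) :
    (if (trimLoopA indent max_width fuel line lines).1 = [] then
        (trimLoopA indent max_width fuel line lines).1
          ++ [(trimLoopA indent max_width fuel line lines).2]
      else
        (trimLoopA indent max_width fuel line lines).1
          ++ [PySem.List.pyRepeat [' '] indent
              ++ (trimLoopA indent max_width fuel line lines).2])
    = lines ++ pvDec indent (decide (lines = [])) (chunksW indent max_width fuel line) := by
  induction fuel generalizing line lines with
  | zero =>
    by_cases h : lines = [] <;> simp [trimLoopA, chunksW, pvDec, h, pvInd]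
  | succ f ih =>
    rw [show chunksW indent max_width (f+1) line =
      (if (line.length : Int) + indent > max_width then
        (PySem.List.slice line none (some (max_width - indent - 1)) ++ ['-']) ::
          chunksW indent max_width f
            (PySem.List.slice line (some (max_width - indent - 1)) none)
      else [line]) from rfl]
    by_cases hc : (line.length : Int) + indent > max_width
    · rw [if_pos hc]
      by_cases h : lines = []
      · subst h
        rw [show trimLoopA indent max_width (f+1) line [] =
          trimLoopA indent max_width f
            (PySem.List.slice line (some (max_width - indent - 1)) none)
            ([] ++ [PySem.List.slice line none (some (max_width - indent - 1)) ++ ['-']])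
          from by rw [trimLoopA]; simp [hc]]
        rw [ih]
        simp [pvDec]
      · rw [show trimLoopA indent max_width (f+1) line lines =
          trimLoopA indent max_width f
            (PySem.List.slice line (some (max_width - indent - 1)) none)
            (lines ++ [PySem.List.pyRepeat [' '] indent ++
              (PySem.List.slice line none (some (max_width - indent - 1)) ++ ['-'])])
          from by rw [trimLoopA]; simp [hc, h]]
        rw [ih]
        have hb : (decide (lines ++ [PySem.List.pyRepeat [' '] indent ++
            (PySem.List.slice line none (some (max_width - indent - 1)) ++ ['-'])] = []))
            = false := by simp
        rw [hb, List.append_assoc]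
        congr 1
        have hbl : (decide (lines = [])) = false := by simp [h]
        rw [hbl]
        simp [pvDec, pvInd]
    · have : trimLoopA indent max_width (f+1) line lines = (lines, line) := by
        rw [trimLoopA]; simp [hc]
      rw [this, if_neg hc]
      by_cases h : lines = [] <;> simp [h, pvDec, pvInd]

-- A's whole fold, restructured
theorem foldA_eq (indent max_width : Int) (ls : List (List Char)) (acc : List (List Char)) :
    ls.foldl
      (fun lines line =>
        if (trimLoopA indent max_width (line.length + 1) line lines).1 = [] then
          (trimLoopA indent max_width (line.length + 1) line lines).1
            ++ [(trimLoopA indent max_width (line.length + 1) line lines).2]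
        else
          (trimLoopA indent max_width (line.length + 1) line lines).1
            ++ [PySem.List.pyRepeat [' '] indent
                ++ (trimLoopA indent max_width (line.length + 1) line lines).2])
      acc
    = acc ++ pvDec indent (decide (acc = []))
        (ls.flatMap (fun line => chunksW indent max_width (line.length + 1) line)) := by
  induction ls generalizing acc with
  | nil => by_cases h : acc = [] <;> simp [pvDec, h]
  | cons l t ih =>
    rw [List.foldl_cons]
    have step := trimLoopA_eq indent max_width (l.length + 1) l acc
    simp only at step ⊢
    rw [step, ih]
    have h1 : chunksW indent max_width (l.length + 1) l ≠ [] := chunksW_ne_nil _ _ _ _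
    have h2 : acc ++ pvDec indent (decide (acc = [])) (chunksW indent max_width (l.length + 1) l)
        ≠ [] := by
      intro h
      exact pvDec_ne_nil indent _ _ h1 (List.append_eq_nil_iff.mp h).2
    have hb2 : (decide ((acc ++ pvDec indent (decide (acc = []))
        (chunksW indent max_width (l.length + 1) l)) = [])) = false := by
      simpa using h2
    rw [hb2]
    rw [List.flatMap_cons, pvDec_append _ _ _ _ h1, List.append_assoc]
    congr 1

-- B's enumerate pass is pvDec true (indices ≥ 1 are all indented)
theorem enumMap_eq (indent : Int) (segs : List (List Char)) (s : Int) (hs : 1 ≤ s) :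
    (PySem.List.enumerate segs s).map
      (fun p => if p.1 = 0 then String.ofList p.2
                else String.ofList (PySem.List.pyRepeat [' '] indent ++ p.2))
    = segs.map (fun x => String.ofList (pvInd indent x)) := by
  induction segs generalizing s with
  | nil => simp [PySem.List.enumerate_nil]
  | cons x t ih =>
    rw [PySem.List.enumerate_cons, List.map_cons, ih (s + 1) (by omega)]
    have : ¬ (s = 0) := by omega
    simp [this, pvInd]

theorem enumMap_top (indent : Int) (segs : List (List Char)) :
    (PySem.List.enumerate segs).map
      (fun p => if p.1 = 0 then String.ofList p.2
                else String.ofList (PySem.List.pyRepeat [' '] indent ++ p.2))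
    = (pvDec indent true segs).map String.ofList := by
  cases segs with
  | nil => simp [PySem.List.enumerate, pvDec]
  | cons x t =>
    rw [show PySem.List.enumerate (x :: t) = (0, x) :: PySem.List.enumerate t 1 from by
          rw [show PySem.List.enumerate (x :: t) = PySem.List.enumerate (x :: t) 0 from rfl,
              PySem.List.enumerate_cons]; norm_num,
        List.map_cons, enumMap_eq indent t 1 le_rfl]
    simp [pvDec, pvInd]

-- arithmetic: Python floor division shifts by one per subtracted divisor
theorem fdiv_sub_w (x w : Int) (hw : w ≠ 0) : (x - w).fdiv w = x.fdiv w - 1 := by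
  have := Int.add_mul_fdiv_right x (-1) hw
  simpa [sub_eq_add_neg] using this

-- proof-side name for B's chunk count, and segsB's zeta-reduced form
def pvK (w indent max_width : Int) (line : List Char) : Int :=
  if (line.length : Int) + indent > max_width
  then PySem.Int.floordiv ((line.length : Int) - w - 2) w + 1 else 0

theorem segsB_def (w indent max_width : Int) (line : List Char) :
    segsB w indent max_width line =
      (PySem.List.pyRange 0 (pvK w indent max_width line)).map
          (fun i => PySem.List.slice line (some (i * w)) (some ((i + 1) * w)) ++ ['-'])
        ++ [PySem.List.slice line (some (pvK w indent max_width line * w)) none] := rfl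

-- core: B's closed form per line equals A's per-line chunk recursion
theorem segsB_eq_chunksW (indent max_width : Int) (fuel : Nat) (line : List Char)
    (hfuel : line.length < fuel)
    (hpre : 1 ≤ max_width - indent - 1 ∨ ¬ ((line.length : Int) + indent > max_width)) :
    chunksW indent max_width fuel line = segsB (max_width - indent - 1) indent max_width line := by
  induction fuel generalizing line with
  | zero => omega
  | succ f ih =>
    set w : Int := max_width - indent - 1 with hw
    by_cases hc : (line.length : Int) + indent > max_width
    · have hw1 : 1 ≤ w := hpre.resolve_right (by simpa using hc)
      have hn : (w.toNat : Int) = w := Int.toNat_of_nonneg (by omega)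
      have hlen : w + 2 ≤ (line.length : Int) := by omega
      rw [show chunksW indent max_width (f+1) line =
        (PySem.List.slice line none (some w) ++ ['-']) ::
          chunksW indent max_width f (PySem.List.slice line (some w) none)
        from by rw [chunksW]; simp [hc, hw]]
      set rest : List Char := PySem.List.slice line (some w) none with hrest
      have hrest_drop : rest = line.drop w.toNat := PySem.List.slice_from line (by omega)
      have hrestlen : (rest.length : Int) = (line.length : Int) - w := by
        rw [hrest_drop, List.length_drop]; omega
      have hrestlt : rest.length < f := by
        have h1 : rest.length = line.length - w.toNat := by rw [hrest_drop, List.length_drop]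
        omega
      rw [ih rest hrestlt (Or.inl hw1)]
      rw [segsB_def, segsB_def]
      set k : Int := pvK w indent max_width line with hk
      have hkval : k = PySem.Int.floordiv ((line.length : Int) - w - 2) w + 1 := by
        rw [hk, pvK, if_pos hc]
      have hk1 : 1 ≤ k := by
        have h0 : (0:Int) ≤ ((line.length : Int) - w - 2).fdiv w :=
          Int.fdiv_nonneg (by omega) (by omega)
        rw [hkval]; simp only [PySem.Int.floordiv]; omega
      have hkrest : pvK w indent max_width rest = k - 1 := by
        by_cases hrc : (rest.length : Int) + indent > max_width
        · rw [pvK, if_pos hrc]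
          have he : (rest.length : Int) - w - 2 = ((line.length : Int) - w - 2) - w := by omega
          rw [he, hkval]
          simp only [PySem.Int.floordiv]
          rw [fdiv_sub_w _ _ (by omega)]
          ring
        · rw [pvK, if_neg hrc]
          have hz : ((line.length : Int) - w - 2).fdiv w = 0 :=
            Int.fdiv_eq_zero_of_lt (by omega) (by omega)
          rw [hkval]
          simp only [PySem.Int.floordiv, hz]; ring
      rw [hkrest]
      rw [PySem.List.pyRange_one_cons (show (0:Int) < k by omega), List.map_cons]
      rw [List.cons_append]
      congr 1
      · have he : PySem.List.slice line (some ((0:Int) * w)) (some (((0:Int) + 1) * w))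
             = PySem.List.slice line none (some w) := by
          rw [PySem.List.slice_toNat line (by omega) (by omega),
              PySem.List.slice_to line (by omega)]
          simp
        rw [he]
      · rw [show ((0:Int) + 1) = 1 by decide]
        congr 1
        · rw [PySem.List.pyRange_one 1 k, PySem.List.pyRange_one 0 (k-1), List.map_map,
              List.map_map]
          rw [show (k - 1 - 0).toNat = (k - 1).toNat by omega]
          apply List.map_congr_left
          intro j hj
          simp only [Function.comp]
          have hjw : (0:Int) ≤ (j:Int) * w := mul_nonneg (by positivity) (by omega)
          have hjw1 : (0:Int) ≤ ((j:Int) + 1) * w := mul_nonneg (by positivity) (by omega)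
          congr 1
          rw [show ((1:Int) + (j:Int)) * w = w + (j:Int) * w by ring,
              show ((1:Int) + (j:Int) + 1) * w = w + ((j:Int) + 1) * w by ring,
              PySem.List.slice_toNat line (by omega) (by omega),
              show (0:Int) + (j:Int) = (j:Int) by ring,
              PySem.List.slice_toNat rest (by omega) (by omega),
              hrest_drop, List.drop_drop]
          rw [show (w + (j:Int) * w).toNat = ((j:Int) * w).toNat + w.toNat by omega,
              show (w + ((j:Int) + 1) * w).toNat = (((j:Int) + 1) * w).toNat + w.toNat by omega]
          rw [Nat.add_comm]
          congr 1
          have hx : ((j:Int) + 1) * w = (j:Int) * w + w := by ring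
          omega
        · have hkw : (0:Int) ≤ (k - 1) * w := mul_nonneg (by omega) (by omega)
          have hkw2 : (0:Int) ≤ k * w := mul_nonneg (by omega) (by omega)
          have hsplit : (k * w).toNat = ((k - 1) * w).toNat + w.toNat := by
            have hx : k * w = (k - 1) * w + w := by ring
            omega
          rw [PySem.List.slice_from line hkw2, PySem.List.slice_from rest hkw,
              hrest_drop, List.drop_drop, hsplit,
              Nat.add_comm (((k - 1) * w).toNat) w.toNat]
    · rw [show chunksW indent max_width (f+1) line = [line] from by rw [chunksW]; simp [hc]]
      rw [segsB_def]
      have hk0 : pvK w indent max_width line = 0 := by rw [pvK, if_neg hc]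
      rw [hk0, PySem.List.pyRange_one_eq_nil le_rfl, List.map_nil, List.nil_append]
      have he : PySem.List.slice line (some ((0:Int) * w)) none = line := by
        rw [show (0:Int) * w = 0 by ring, PySem.List.slice_from line le_rfl]
        simp
      rw [he]

-- ===== VERDICT (by name: the statement is the Claim_ definition above) =====
theorem trim_lines_spec : Claim_equal_trim_lines := by
  intro content indent max_width _ hpre
  unfold Spec_trim_lines trim_lines trim_lines_alt
  rw [foldA_eq, enumMap_top]
  have hseg : (PySem.Chars.splitOn content.toList ['\n']).flatMap
        (fun line => chunksW indent max_width (line.length + 1) line)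
      = (PySem.Chars.splitOn content.toList ['\n']).flatMap
        (segsB (max_width - indent - 1) indent max_width) := by
    apply List.flatMap_congr
    intro l hl
    apply segsB_eq_chunksW indent max_width (l.length + 1) l (by omega)
    rcases hpre with h | h
    · left; omega
    · right; have := h l hl; omega
  rw [hseg]
  simp [pvDec]
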